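-- pv_equiv track=rewrite | github.com/evalscuola/test-suite | evaluatest/evaluatest.py | makeCorrelationMatrixEEIC
-- ===== SOURCE A (Python) =====
-- def compareAnswerStringEEIC(answerString1, answerString2, qNumber, pointsMatrix):
--     index = 0
--     for k in range(0,qNumber):
--         if answerString1[k] != 'A' and answerString1[k] != '-' and answerString1[k] == answerString2[k]:
--             index = index + 1
--     return index
--
-- def makeCorrelationMatrixEEIC(answersMatrix, verNumber, qNumber):
--
--     correlationMatrix = []
--
--     for j1 in range(0,verNumber+1):
--         correlationLine = [0 for x in range(0,verNumber+1)]
--         for j2 in range(0,verNumber):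
--             if j1 != j2:
--                 correlationLine[j2:j2+1] = [compareAnswerStringEEIC(answersMatrix[j1], answersMatrix[j2], qNumber," ")]
--             else:
--                 correlationLine[j2:j2+1] = [0]
--
--         correlationMatrix.append(correlationLine)
--
--     return correlationMatrix
-- ===== SOURCE B (Python) =====
-- def makeCorrelationMatrixEEIC(answersMatrix, verNumber, qNumber):
--     # Index each version's answers once: question position -> answer char,
--     # skipping 'A' and '-', so each pairwise agreement is a dict-intersection count.
--     keyed = []
--     for v in range(verNumber + 1):
--         keyed.append({k: answersMatrix[v][k] for k in range(qNumber)
--                       if answersMatrix[v][k] != 'A' and answersMatrix[v][k] != '-'})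
--     matrix = []
--     for j1, d1 in enumerate(keyed):
--         row = []
--         for j2, d2 in enumerate(keyed):
--             if j1 != j2 and j2 < verNumber:
--                 row.append(sum(1 for k, c in d1.items() if d2.get(k) == c))
--             else:
--                 row.append(0)
--         matrix.append(row)
--     return matrix
-- ===== Notes on version B (the rewrite author's own statement) =====
-- stated objective: alternative
-- what changed: Replaces A's per-pair rescan of the raw answer strings (re-reading and re-filtering both strings for every ordered pair) by a per-version dict index question->kept-answer built once, each matrix entry then being a dict-intersection count.
-- outside the precondition, e.g. on makeCorrelationMatrixEEIC(['x', 'AA'], 1, 2): A returns [[0, 0], [0, 0]], B raises IndexError; on makeCorrelationMatrixEEIC([], 0, 1): A returns [[0]], B raises IndexError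
import Mathlib
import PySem

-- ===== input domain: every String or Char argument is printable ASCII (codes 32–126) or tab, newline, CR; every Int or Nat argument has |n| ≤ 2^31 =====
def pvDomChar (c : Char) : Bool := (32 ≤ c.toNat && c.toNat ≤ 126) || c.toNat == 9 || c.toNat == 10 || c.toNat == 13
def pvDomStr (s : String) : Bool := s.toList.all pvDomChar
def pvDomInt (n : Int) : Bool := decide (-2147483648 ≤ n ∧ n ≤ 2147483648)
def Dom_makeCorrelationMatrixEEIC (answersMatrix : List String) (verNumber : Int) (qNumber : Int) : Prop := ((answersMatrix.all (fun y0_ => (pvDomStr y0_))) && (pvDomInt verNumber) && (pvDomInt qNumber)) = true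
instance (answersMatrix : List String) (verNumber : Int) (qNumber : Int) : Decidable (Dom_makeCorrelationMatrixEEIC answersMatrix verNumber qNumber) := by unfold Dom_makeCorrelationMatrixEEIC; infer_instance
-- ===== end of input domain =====

-- B replaces A's per-pair rescan of the answer strings by a per-version dict index
-- (question position -> kept answer char) built once; entries are dict-intersection counts
-- (objective: alternative decomposition, same asymptotic cost).

-- ===== PORT A =====
def compareAnswerStringEEIC (answerString1 : String) (answerString2 : String) (qNumber : Int) (_pointsMatrix : String) : Int :=
  (PySem.List.pyRange 0 qNumber 1).foldl (fun index k =>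
    let c1 := (PySem.Str.pyGet? answerString1 k).getD ' '   -- default unreachable under Pre_
    if c1 ≠ 'A' ∧ c1 ≠ '-' ∧ c1 = (PySem.Str.pyGet? answerString2 k).getD ' ' then index + 1 else index) 0

def makeCorrelationMatrixEEIC (answersMatrix : List String) (verNumber : Int) (qNumber : Int) : List (List Int) :=
  (PySem.List.pyRange 0 (verNumber + 1) 1).foldl (fun correlationMatrix j1 =>
    let line0 : List Int := (PySem.List.pyRange 0 (verNumber + 1) 1).map (fun _ => 0)
    -- correlationLine[j2:j2+1] = [x] with 0 ≤ j2 < len(line) is exactly List.set j2 x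
    let line := (PySem.List.pyRange 0 verNumber 1).foldl (fun line j2 =>
      if j1 ≠ j2 then
        line.set j2.toNat (compareAnswerStringEEIC ((PySem.List.pyGet? answersMatrix j1).getD "")
          ((PySem.List.pyGet? answersMatrix j2).getD "") qNumber " ")
      else
        line.set j2.toNat 0) line0
    correlationMatrix ++ [line]) []

-- ===== PORT B =====
-- {k: answersMatrix[v][k] for k in range(qNumber) if answersMatrix[v][k] != 'A' and answersMatrix[v][k] != '-'}
def pvKeyed (answersMatrix : List String) (v : Int) (qNumber : Int) : PySem.Dict Int Char :=
  (PySem.List.pyRange 0 qNumber 1).foldl (fun d k =>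
    let c := (PySem.Str.pyGet? ((PySem.List.pyGet? answersMatrix v).getD "") k).getD ' '   -- default unreachable under Pre_
    if c ≠ 'A' ∧ c ≠ '-' then d.insert k c else d) PySem.Dict.empty

-- sum(1 for k, c in d1.items() if d2.get(k) == c)
def pvAgree (d1 d2 : PySem.Dict Int Char) : Int :=
  d1.items.foldl (fun n kc => if d2.get? kc.1 = some kc.2 then n + 1 else n) 0

def makeCorrelationMatrixEEIC_alt (answersMatrix : List String) (verNumber : Int) (qNumber : Int) : List (List Int) :=
  let keyed := (PySem.List.pyRange 0 (verNumber + 1) 1).foldl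
    (fun acc v => acc ++ [pvKeyed answersMatrix v qNumber]) ([] : List (PySem.Dict Int Char))
  (PySem.List.enumerate keyed 0).foldl (fun matrix p1 =>
    let row := (PySem.List.enumerate keyed 0).foldl (fun row p2 =>
      if p1.1 ≠ p2.1 ∧ p2.1 < verNumber then row ++ [pvAgree p1.2 p2.2] else row ++ [0]) ([] : List Int)
    matrix ++ [row]) []

-- ===== PRECONDITION & SPEC =====
-- Pre_ excludes exactly the IndexError inputs of the two programs: lists with at most verNumber
-- entries, and (for qNumber ≥ 1) a string shorter than qNumber among the first verNumber+1.
-- A still returns on a few of these corners (verNumber = 0 with a missing/short string, or a short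
-- string whose unread positions are shielded by 'A'/'-' in the other string); B's one-pass indexer
-- reads every position of every string and raises IndexError there, so they stay excluded.
def Pre_makeCorrelationMatrixEEIC (answersMatrix : List String) (verNumber : Int) (qNumber : Int) : Prop :=
  (1 ≤ verNumber → verNumber < (answersMatrix.length : Int)) ∧
  (0 ≤ verNumber → 1 ≤ qNumber →
    verNumber < (answersMatrix.length : Int) ∧
    ∀ s ∈ answersMatrix.take (verNumber.toNat + 1), qNumber ≤ (s.length : Int))
instance (answersMatrix : List String) (verNumber : Int) (qNumber : Int) : Decidable (Pre_makeCorrelationMatrixEEIC answersMatrix verNumber qNumber) := by unfold Pre_makeCorrelationMatrixEEIC; infer_instance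

def pvWitness_makeCorrelationMatrixEEIC : List String × Int × Int := (["BC", "Bx"], 1, 2)

def Spec_makeCorrelationMatrixEEIC (answersMatrix : List String) (verNumber : Int) (qNumber : Int) (out : List (List Int)) : Prop := out = makeCorrelationMatrixEEIC_alt answersMatrix verNumber qNumber
instance (answersMatrix : List String) (verNumber : Int) (qNumber : Int) (out : List (List Int)) : Decidable (Spec_makeCorrelationMatrixEEIC answersMatrix verNumber qNumber out) := by unfold Spec_makeCorrelationMatrixEEIC; infer_instance

-- ===== CLAIM (what is proved, stated in full; the proofs are below) =====
def Claim_equal_makeCorrelationMatrixEEIC : Prop := ∀ (answersMatrix : List String) (verNumber : Int) (qNumber : Int), Dom_makeCorrelationMatrixEEIC answersMatrix verNumber qNumber → Pre_makeCorrelationMatrixEEIC answersMatrix verNumber qNumber → Spec_makeCorrelationMatrixEEIC answersMatrix verNumber qNumber (makeCorrelationMatrixEEIC answersMatrix verNumber qNumber)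

-- ===== LEMMAS AND PROOFS =====

-- the character both ports read at position k of s (shared reading convention, default ' ')
def pvCh (s : String) (k : Int) : Char := (PySem.Str.pyGet? s k).getD ' '

lemma pv_foldl_set (n : Nat) (g : Nat → Int) (f : Int → Int) :
    ∀ (b : Nat), b ≤ n →
    (PySem.List.pyRange 0 b 1).foldl (fun l j => l.set j.toNat (f j)) ((List.range n).map g)
      = (List.range n).map (fun i => if i < b then f (i : Int) else g i) := by
  intro b
  induction b with
  | zero =>
    intro _
    rw [PySem.List.pyRange_one_eq_nil (by omega)]
    simp
  | succ m ih =>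
    intro hb
    have hsplit : PySem.List.pyRange 0 (((m + 1 : Nat) : Int)) 1
        = PySem.List.pyRange 0 (m : Int) 1 ++ [(m : Int)] := by
      have := PySem.List.pyRange_one_succ_right (a := 0) (b := (m : Int)) (by omega)
      push_cast at this ⊢
      exact this
    rw [hsplit, List.foldl_append, ih (by omega)]
    simp only [List.foldl_cons, List.foldl_nil, Int.toNat_natCast]
    apply List.ext_getElem
    · simp
    · intro i h1 h2
      simp only [List.getElem_set, List.getElem_map, List.getElem_range]
      by_cases him : m = i
      · subst him; simp
      · rw [if_neg him]
        by_cases hlt : i < m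
        · rw [if_pos hlt, if_pos (by omega)]
        · rw [if_neg hlt, if_neg (by omega)]

lemma pv_pyRange_toNat (b : Int) :
    PySem.List.pyRange 0 ((b.toNat : Nat) : Int) 1 = PySem.List.pyRange 0 b 1 := by
  by_cases h : 0 ≤ b
  · rw [Int.toNat_of_nonneg h]
  · rw [PySem.List.pyRange_one_eq_nil (by omega), PySem.List.pyRange_one_eq_nil (by omega)]

-- A's matrix in closed map form
lemma pv_A_eq_map (am : List String) (V q : Int) :
    makeCorrelationMatrixEEIC am V q
      = (PySem.List.pyRange 0 (V + 1) 1).map (fun j1 => (PySem.List.pyRange 0 (V + 1) 1).map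
          (fun j2 => if j1 ≠ j2 ∧ j2 < V then
            compareAnswerStringEEIC ((PySem.List.pyGet? am j1).getD "") ((PySem.List.pyGet? am j2).getD "") q " "
          else 0)) := by
  unfold makeCorrelationMatrixEEIC
  rw [PySem.List.foldl_append_singleton_eq_map]
  rw [List.nil_append]
  apply List.map_congr_left
  intro j1 hj1
  have hj1' := (PySem.List.mem_pyRange_one).1 hj1
  -- rewrite the inner fold body into a single set of an if-value
  have hbody :
      (PySem.List.pyRange 0 V 1).foldl (fun line j2 =>
        if j1 ≠ j2 then
          line.set j2.toNat (compareAnswerStringEEIC ((PySem.List.pyGet? am j1).getD "")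
            ((PySem.List.pyGet? am j2).getD "") q " ")
        else line.set j2.toNat 0) ((PySem.List.pyRange 0 (V + 1) 1).map (fun _ => 0))
      = (PySem.List.pyRange 0 V 1).foldl (fun line j2 =>
          line.set j2.toNat (if j1 ≠ j2 then
            compareAnswerStringEEIC ((PySem.List.pyGet? am j1).getD "")
              ((PySem.List.pyGet? am j2).getD "") q " " else 0))
          ((PySem.List.pyRange 0 (V + 1) 1).map (fun _ => 0)) := by
    apply PySem.List.foldl_congr_mem
    intro acc x _
    by_cases h : j1 ≠ x <;> simp [h]
  rw [hbody]
  rw [PySem.List.pyRange_one (a := 0) (b := V + 1)]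
  simp only [Int.sub_zero, zero_add]
  rw [List.map_map]
  rw [← pv_pyRange_toNat V]
  rw [pv_foldl_set ((V + 1).toNat) _ _ V.toNat (by omega)]
  rw [List.map_map]
  apply List.map_congr_left
  intro i hi
  simp only [Function.comp]
  have hi' : i < (V + 1).toNat := by simpa using (List.mem_range).1 hi
  by_cases hlt : (i : Int) < V
  · rw [if_pos (by omega)]
    by_cases hne : j1 ≠ (i : Int)
    · rw [if_pos hne, if_pos ⟨hne, hlt⟩]
    · rw [if_neg hne, if_neg (by tauto)]
  · rw [if_neg (by omega), if_neg (by tauto)]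

-- characterisation of B's per-version index dict
lemma pv_items_keyed (am : List String) (v q : Int) :
    (pvKeyed am v q).items
      = ((PySem.List.pyRange 0 q 1).filter
          (fun k => decide (pvCh ((PySem.List.pyGet? am v).getD "") k ≠ 'A'
            ∧ pvCh ((PySem.List.pyGet? am v).getD "") k ≠ '-'))).map
          (fun k => (k, pvCh ((PySem.List.pyGet? am v).getD "") k)) := by
  unfold pvKeyed pvCh
  rw [PySem.List.foldl_ite_eq_foldl_filter]
  rw [PySem.Dict.items_foldl_insert_fresh (k := fun a => a)
      (v := fun k => (PySem.Str.pyGet? ((PySem.List.pyGet? am v).getD "") k).getD ' ')]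
  · simp [PySem.Dict.empty]
  · intro a _; exact PySem.Dict.contains_empty a
  · simpa using (PySem.List.nodup_pyRange_one (a := 0) (b := q)).filter _

lemma pv_get?_keyed (am : List String) (v q k : Int) :
    (pvKeyed am v q).get? k
      = if 0 ≤ k ∧ k < q ∧ pvCh ((PySem.List.pyGet? am v).getD "") k ≠ 'A'
            ∧ pvCh ((PySem.List.pyGet? am v).getD "") k ≠ '-' then
          some (pvCh ((PySem.List.pyGet? am v).getD "") k)
        else none := by
  have hkeys : (pvKeyed am v q).keys
      = (PySem.List.pyRange 0 q 1).filter
          (fun k => decide (pvCh ((PySem.List.pyGet? am v).getD "") k ≠ 'A'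
            ∧ pvCh ((PySem.List.pyGet? am v).getD "") k ≠ '-')) := by
    simp only [PySem.Dict.keys, pv_items_keyed, List.map_map]
    simp [Function.comp_def]
  have hnd : (pvKeyed am v q).keys.Nodup := by
    rw [hkeys]
    exact (PySem.List.nodup_pyRange_one (a := 0) (b := q)).filter _
  split_ifs with h
  · apply PySem.Dict.get?_of_mem_items (d := pvKeyed am v q) ?_ hnd
    rw [pv_items_keyed]
    apply List.mem_map.2
    refine ⟨k, ?_, rfl⟩
    rw [List.mem_filter]
    exact ⟨(PySem.List.mem_pyRange_one).2 ⟨h.1, h.2.1⟩, by simpa using h.2.2⟩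
  · rw [PySem.Dict.get?_eq_none_iff_not_mem_keys]
    rw [hkeys]
    intro hmem
    rw [List.mem_filter] at hmem
    have h1 := (PySem.List.mem_pyRange_one).1 hmem.1
    have h2 := hmem.2
    simp only [decide_eq_true_eq] at h2
    exact h ⟨h1.1, h1.2, h2⟩

-- each entry of B equals A's pairwise comparison
lemma pv_agree_eq_compare (am : List String) (i j q : Int) :
    pvAgree (pvKeyed am i q) (pvKeyed am j q)
      = compareAnswerStringEEIC ((PySem.List.pyGet? am i).getD "") ((PySem.List.pyGet? am j).getD "") q " " := by
  unfold pvAgree compareAnswerStringEEIC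
  rw [pv_items_keyed]
  rw [PySem.List.foldl_ite_add_one]
  rw [PySem.List.foldl_ite_add_one]
  simp only [zero_add]
  norm_cast
  rw [List.countP_map]
  rw [List.countP_filter]
  apply List.countP_congr
  intro k hk
  have hk' := (PySem.List.mem_pyRange_one).1 hk
  simp only [Function.comp_def, pv_get?_keyed, pvCh, Bool.and_eq_true, decide_eq_true_eq]
  set c1 := (PySem.Str.pyGet? ((PySem.List.pyGet? am i).getD "") k).getD ' ' with hc1
  set c2 := (PySem.Str.pyGet? ((PySem.List.pyGet? am j).getD "") k).getD ' ' with hc2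
  constructor
  · rintro ⟨h1, h2⟩
    by_cases hcond : 0 ≤ k ∧ k < q ∧ c2 ≠ 'A' ∧ c2 ≠ '-'
    · rw [if_pos hcond] at h1
      exact ⟨h2.1, h2.2, (Option.some.inj h1).symm⟩
    · rw [if_neg hcond] at h1
      exact absurd h1 (by simp)
  · rintro ⟨h1, h2, h3⟩
    refine ⟨?_, h1, h2⟩
    rw [if_pos ⟨hk'.1, hk'.2, h3 ▸ h1, h3 ▸ h2⟩, h3]

-- B's matrix in the same closed map form
lemma pv_B_eq_map (am : List String) (V q : Int) :
    makeCorrelationMatrixEEIC_alt am V q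
      = (PySem.List.pyRange 0 (V + 1) 1).map (fun j1 => (PySem.List.pyRange 0 (V + 1) 1).map
          (fun j2 => if j1 ≠ j2 ∧ j2 < V then pvAgree (pvKeyed am j1 q) (pvKeyed am j2 q) else 0)) := by
  unfold makeCorrelationMatrixEEIC_alt
  rw [PySem.List.foldl_append_singleton_eq_map]
  have hkeyed : (PySem.List.pyRange 0 (V + 1) 1).foldl
      (fun acc v => acc ++ [pvKeyed am v q]) ([] : List (PySem.Dict Int Char))
      = (PySem.List.pyRange 0 (V + 1) 1).map (fun v => pvKeyed am v q) := by
    rw [PySem.List.foldl_append_singleton_eq_map, List.nil_append]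
  have henum : PySem.List.enumerate ((PySem.List.pyRange 0 (V + 1) 1).map (fun v => pvKeyed am v q)) 0
      = (PySem.List.pyRange 0 (V + 1) 1).map (fun v => (v, pvKeyed am v q)) := by
    rw [PySem.List.enumerate_eq_map_pyRange (d := PySem.Dict.empty)]
    simp only [PySem.List.len_eq, List.length_map, PySem.List.length_pyRange_one, Int.sub_zero]
    rw [pv_pyRange_toNat]
    apply List.map_congr_left
    intro v hv
    have hv' := (PySem.List.mem_pyRange_one).1 hv
    rw [PySem.List.pyGetD_map_pyRange_of_nonneg _ _ _ _ hv'.1 hv'.2]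
  rw [hkeyed, henum, List.nil_append, List.map_map]
  apply List.map_congr_left
  intro j1 _
  simp only [Function.comp]
  have hrow : ∀ (a : Int) (bd : PySem.Dict Int Char),
      (((PySem.List.pyRange 0 (V + 1) 1).map (fun v => (v, pvKeyed am v q))).foldl (fun row p2 =>
        if a ≠ p2.1 ∧ p2.1 < V then row ++ [pvAgree bd p2.2] else row ++ [0]) ([] : List Int))
      = (PySem.List.pyRange 0 (V + 1) 1).map (fun j2 =>
          if a ≠ j2 ∧ j2 < V then pvAgree bd (pvKeyed am j2 q) else 0) := by
    intro a bd
    have hpush : (((PySem.List.pyRange 0 (V + 1) 1).map (fun v => (v, pvKeyed am v q))).foldl (fun row p2 =>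
        if a ≠ p2.1 ∧ p2.1 < V then row ++ [pvAgree bd p2.2] else row ++ [0]) ([] : List Int))
        = (((PySem.List.pyRange 0 (V + 1) 1).map (fun v => (v, pvKeyed am v q))).foldl (fun row p2 =>
            row ++ [if a ≠ p2.1 ∧ p2.1 < V then pvAgree bd p2.2 else 0]) ([] : List Int)) := by
      apply PySem.List.foldl_congr_mem
      intro acc x _
      by_cases h : a ≠ x.1 ∧ x.1 < V <;> simp [h]
    rw [hpush, PySem.List.foldl_append_singleton_eq_map, List.nil_append, List.map_map]
    rfl
  rw [hrow j1 (pvKeyed am j1 q)]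

-- ===== VERDICT (by name: the statement is the Claim_ definition above) =====
theorem makeCorrelationMatrixEEIC_spec : Claim_equal_makeCorrelationMatrixEEIC := by
  intro am V q _ _
  unfold Spec_makeCorrelationMatrixEEIC
  rw [pv_A_eq_map, pv_B_eq_map]
  apply List.map_congr_left
  intro j1 _
  apply List.map_congr_left
  intro j2 _
  by_cases h : j1 ≠ j2 ∧ j2 < V
  · rw [if_pos h, if_pos h, pv_agree_eq_compare]
  · rw [if_neg h, if_neg h]
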